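-- pv_equiv track=rewrite | github.com/ikerrrrrrrrrrr/Cyrene | src/webui/routes.py | _prune_flow_rounds
-- ===== SOURCE A (Python) =====
-- def _round_has_activity(raw_msgs: list[dict]) -> bool:
--     return any(str(msg.get("role", "")) != "user" for msg in raw_msgs)
--
-- def _prune_flow_rounds(rounds: list[list[dict]]) -> tuple[list[list[dict]], int]:
--     """Keep substantive rounds plus the latest pending user-only round.
--
--     This prevents interrupted trailing user messages from stretching the flow
--     into multiple empty rounds while still preserving the latest pending input.
--     """
--     if not rounds:
--         return [], -1
--
--     substantive_indices = [i for i, round_raw in enumerate(rounds) if _round_has_activity(round_raw)]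
--     if not substantive_indices:
--         return [rounds[-1]], 0
--
--     keep_indices = set(substantive_indices)
--     latest_substantive = substantive_indices[-1]
--     tail_pending = [
--         i for i in range(latest_substantive + 1, len(rounds))
--         if not _round_has_activity(rounds[i])
--     ]
--     if tail_pending:
--         keep_indices.add(tail_pending[-1])
--
--     pruned: list[list[dict]] = []
--     index_map: dict[int, int] = {}
--     for original_index, round_raw in enumerate(rounds):
--         if original_index not in keep_indices:
--             continue
--         index_map[original_index] = len(pruned)
--         pruned.append(round_raw)
--
--     return pruned, index_map[latest_substantive]
-- ===== SOURCE B (Python) =====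
-- def _round_has_activity(raw_msgs: list[dict]) -> bool:
--     return any(str(msg.get("role", "")) != "user" for msg in raw_msgs)
--
-- def _prune_flow_rounds(rounds: list[list[dict]]) -> tuple[list[list[dict]], int]:
--     """Single pass: keep the substantive rounds; the latest substantive one is
--     simply the last kept so far; a non-active final round is the only pending
--     round worth keeping, appended at the end."""
--     if not rounds:
--         return [], -1
--     pruned = []
--     for round_raw in rounds:
--         if _round_has_activity(round_raw):
--             pruned.append(round_raw)
--     if not pruned:
--         return [rounds[-1]], 0
--     latest_pos = len(pruned) - 1
--     if not _round_has_activity(rounds[-1]):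
--         pruned.append(rounds[-1])
--     return pruned, latest_pos
-- ===== Notes on version B (the rewrite author's own statement) =====
-- stated objective: simpler
-- what changed: Replaces A's five-stage pipeline (substantive index list, keep set, tail_pending scan over a range, index_map dict, final filtered rebuild) by one pass that appends active rounds directly, using the facts that the latest substantive round is the last one appended and that the only keepable pending round is a non-active final round.
import Mathlib
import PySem

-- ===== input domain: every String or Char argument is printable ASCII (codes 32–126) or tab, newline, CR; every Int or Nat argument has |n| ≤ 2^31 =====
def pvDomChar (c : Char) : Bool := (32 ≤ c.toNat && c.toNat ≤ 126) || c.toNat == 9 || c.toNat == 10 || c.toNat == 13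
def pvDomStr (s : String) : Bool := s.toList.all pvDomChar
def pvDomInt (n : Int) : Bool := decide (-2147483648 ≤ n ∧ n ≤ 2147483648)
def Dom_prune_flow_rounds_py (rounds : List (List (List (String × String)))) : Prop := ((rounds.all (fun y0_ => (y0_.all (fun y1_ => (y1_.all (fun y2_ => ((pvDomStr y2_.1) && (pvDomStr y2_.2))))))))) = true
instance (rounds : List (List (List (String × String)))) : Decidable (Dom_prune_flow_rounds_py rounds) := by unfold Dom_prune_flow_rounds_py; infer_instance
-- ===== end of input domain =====

-- B replaces A's five-stage pipeline (substantive index list, keep set, tail_pending scan,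
-- index_map dict, filtered rebuild) by ONE pass appending active rounds, plus one check of the
-- final round; objective: simpler (same asymptotic cost).

abbrev PVRound := List (List (String × String))

-- _round_has_activity (identical helper in both Python sources)
def pvAct (raw_msgs : List (List (String × String))) : Bool :=
  raw_msgs.any (fun msg => decide (((PySem.Dict.mk msg).getD "role" "") ≠ "user"))

-- ===== PORT A =====
def prune_flow_rounds_py (rounds : List (List (List (String × String)))) : (List (List (List (String × String)))) × Int :=
  if rounds = [] then ([], -1)
  else
    let substantive_indices :=
      (rounds.foldl (fun (s : Int × List Int) round_raw =>
        (s.1 + 1, if pvAct round_raw then s.2 ++ [s.1] else s.2)) (0, [])).2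
    if substantive_indices = [] then ([PySem.List.pyGetD rounds (-1) []], 0)
    else
      let latest_substantive := PySem.List.pyGetD substantive_indices (-1) 0
      let keep_indices : PySem.Set Int := PySem.Set.ofList substantive_indices
      let tail_pending :=
        (PySem.List.pyRange (latest_substantive + 1) (PySem.List.len rounds) 1).filter
          (fun i => !(pvAct (PySem.List.pyGetD rounds i [])))
      let keep :=
        if tail_pending = [] then keep_indices
        else PySem.Set.add keep_indices (PySem.List.pyGetD tail_pending (-1) 0)
      let fin := rounds.foldl
        (fun (s : Int × List PVRound × PySem.Dict Int Int) round_raw =>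
          if PySem.Set.contains keep s.1 then
            (s.1 + 1, s.2.1 ++ [round_raw], (s.2.2).insert s.1 (PySem.List.len s.2.1))
          else (s.1 + 1, s.2.1, s.2.2))
        (0, ([], PySem.Dict.empty))
      -- index_map[latest_substantive]: the key is always present, so the default is never used
      (fin.2.1, ((fin.2.2).get? latest_substantive).getD 0)

-- ===== PORT B =====
def prune_flow_rounds_py_alt (rounds : List (List (List (String × String)))) : (List (List (List (String × String)))) × Int :=
  if rounds = [] then ([], -1)
  else
    let pruned := rounds.foldl (fun acc round_raw => if pvAct round_raw then acc ++ [round_raw] else acc) []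
    if pruned = [] then ([PySem.List.pyGetD rounds (-1) []], 0)
    else
      let latest_pos := PySem.List.len pruned - 1
      if !(pvAct (PySem.List.pyGetD rounds (-1) [])) then
        (pruned ++ [PySem.List.pyGetD rounds (-1) []], latest_pos)
      else (pruned, latest_pos)

-- ===== PRECONDITION & SPEC =====
def Spec_prune_flow_rounds_py (rounds : List (List (List (String × String)))) (out : (List (List (List (String × String)))) × Int) : Prop := out = prune_flow_rounds_py_alt rounds
instance (rounds : List (List (List (String × String)))) (out : (List (List (List (String × String)))) × Int) : Decidable (Spec_prune_flow_rounds_py rounds out) := by unfold Spec_prune_flow_rounds_py; infer_instance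

-- ===== CLAIM (what is proved, stated in full; the proofs are below) =====
def Claim_equal_prune_flow_rounds_py : Prop := ∀ (rounds : List (List (List (String × String)))), Dom_prune_flow_rounds_py rounds → Spec_prune_flow_rounds_py rounds (prune_flow_rounds_py rounds)

-- ===== LEMMAS AND PROOFS =====

-- indices (from offset i0) of the active rounds: the value of A's substantive_indices loop
def pvIdxs (i0 : Int) : List PVRound → List Int
  | [] => []
  | r :: l => (if pvAct r then [i0] else []) ++ pvIdxs (i0 + 1) l


theorem pvIdxs_foldl (l : List PVRound) (i0 : Int) (acc : List Int) :
    (l.foldl (fun (s : Int × List Int) round_raw =>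
      (s.1 + 1, if pvAct round_raw then s.2 ++ [s.1] else s.2)) (i0, acc)).2
    = acc ++ pvIdxs i0 l := by
  induction l generalizing i0 acc with
  | nil => simp [pvIdxs]
  | cons r l ih => by_cases h : pvAct r <;> simp [pvIdxs, h, ih]

theorem pvIdxs_append (l1 l2 : List PVRound) (i0 : Int) :
    pvIdxs i0 (l1 ++ l2) = pvIdxs i0 l1 ++ pvIdxs (i0 + l1.length) l2 := by
  induction l1 generalizing i0 with
  | nil => simp [pvIdxs]
  | cons r l ih =>
    have he : i0 + 1 + (l.length : Int) = i0 + ((l.length : Int) + 1) := by ring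
    by_cases h : pvAct r <;> simp [pvIdxs, h, ih, he]

theorem pvIdxs_nil_iff (l : List PVRound) (i0 : Int) :
    pvIdxs i0 l = [] ↔ l.filter pvAct = [] := by
  induction l generalizing i0 with
  | nil => simp [pvIdxs]
  | cons r l ih => by_cases h : pvAct r <;> simp [pvIdxs, h, ih]

theorem pvIdxs_length (l : List PVRound) (i0 : Int) :
    (pvIdxs i0 l).length = (l.filter pvAct).length := by
  induction l generalizing i0 with
  | nil => simp [pvIdxs]
  | cons r l ih => by_cases h : pvAct r <;> simp [pvIdxs, h, ih]

theorem pvIdxs_mem_iff (l : List PVRound) (i0 j : Int) :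
    j ∈ pvIdxs i0 l ↔ ∃ k : Nat, k < l.length ∧ j = i0 + k ∧ pvAct (l.getD k []) := by
  induction l generalizing i0 with
  | nil => simp [pvIdxs]
  | cons r l ih =>
    simp only [pvIdxs, List.mem_append, ih]
    constructor
    · rintro (h1 | ⟨k, hk, rfl, ha⟩)
      · by_cases h : pvAct r
        · simp [h] at h1
          exact ⟨0, by simp, by simp [h1], by simpa using h⟩
        · simp [h] at h1
      · exact ⟨k + 1, by simp; omega, by push_cast; ring, by simpa using ha⟩
    · rintro ⟨k, hk, rfl, ha⟩
      cases k with
      | zero => left; simp only [List.getD_cons_zero] at ha; simp [ha]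
      | succ k =>
        right
        exact ⟨k, by simp at hk; omega, by push_cast; ring, by simpa using ha⟩

theorem pvIdxs_take (l : List PVRound) (i0 : Int) (t : Nat) :
    pvIdxs i0 (l.take t) = (pvIdxs i0 l).filter (fun j => decide (j < i0 + t)) := by
  induction l generalizing i0 t with
  | nil => simp [pvIdxs]
  | cons r l ih =>
    cases t with
    | zero =>
      simp only [List.take_zero, pvIdxs, Nat.cast_zero, add_zero]
      symm
      rw [List.filter_eq_nil_iff]
      intro j hj
      rcases (pvIdxs_mem_iff (r :: l) i0 j).mp hj with ⟨k, _, rfl, _⟩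
      simp
    | succ t =>
      have hpred : ∀ j : Int, (decide (j < i0 + 1 + (t : Int))) = (decide (j < i0 + ((t : Nat) + 1 : Nat))) := by
        intro j; simp only [decide_eq_decide]; push_cast; omega
      by_cases h : pvAct r <;> simp [pvIdxs, h, ih, hpred]

theorem pvIdxs_pairwise (l : List PVRound) (i0 : Int) :
    (pvIdxs i0 l).Pairwise (· < ·) := by
  induction l generalizing i0 with
  | nil => simp [pvIdxs]
  | cons r l ih =>
    simp only [pvIdxs]
    rw [List.pairwise_append]
    refine ⟨?_, ih (i0 + 1), ?_⟩
    · by_cases h : pvAct r <;> simp [h]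
    · intro x hx y hy
      rcases (pvIdxs_mem_iff l (i0 + 1) y).mp hy with ⟨k, _, rfl, _⟩
      by_cases h : pvAct r
      · simp [h] at hx; omega
      · simp [h] at hx

-- rounds (from offset i0) whose index satisfies K: the pruned list A's final loop builds
def pvKept (K : Int → Bool) (i0 : Int) : List PVRound → List PVRound
  | [] => []
  | r :: l => (if K i0 then [r] else []) ++ pvKept K (i0 + 1) l

theorem pvKept_append (K : Int → Bool) (l1 l2 : List PVRound) (i0 : Int) :
    pvKept K i0 (l1 ++ l2) = pvKept K i0 l1 ++ pvKept K (i0 + l1.length) l2 := by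
  induction l1 generalizing i0 with
  | nil => simp [pvKept]
  | cons r l ih =>
    have he : i0 + 1 + (l.length : Int) = i0 + ((l.length : Int) + 1) := by ring
    by_cases h : K i0 <;> simp [pvKept, h, ih, he]

theorem pvKept_eq_filter (K : Int → Bool) (l : List PVRound) (i0 : Int)
    (h : ∀ k : Nat, k < l.length → K (i0 + k) = pvAct (l.getD k [])) :
    pvKept K i0 l = l.filter pvAct := by
  induction l generalizing i0 with
  | nil => simp [pvKept]
  | cons r l ih =>
    have h0 : K i0 = pvAct r := by simpa using h 0 (by simp)
    have hrest : pvKept K (i0 + 1) l = l.filter pvAct := by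
      apply ih
      intro k hk
      have h1 := h (k + 1) (by simp [hk])
      have he : i0 + ((k + 1 : Nat) : Int) = i0 + 1 + (k : Nat) := by omega
      rw [he] at h1
      simpa using h1
    by_cases hr : pvAct r <;> simp [pvKept, h0, hr, hrest]

theorem pvLoop_pruned (K : Int → Bool) (l : List PVRound) (i0 : Int)
    (p0 : List PVRound) (m0 : PySem.Dict Int Int) :
    (l.foldl (fun (s : Int × List PVRound × PySem.Dict Int Int) round_raw =>
        if K s.1 then
          (s.1 + 1, s.2.1 ++ [round_raw], (s.2.2).insert s.1 (PySem.List.len s.2.1))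
        else (s.1 + 1, s.2.1, s.2.2)) (i0, (p0, m0))).2.1
    = p0 ++ pvKept K i0 l := by
  induction l generalizing i0 p0 m0 with
  | nil => simp [pvKept]
  | cons r l ih =>
    simp only [List.foldl_cons]
    by_cases h : K i0
    · rw [if_pos h, ih]
      simp [pvKept, h]
    · rw [if_neg h, ih]
      simp [pvKept, h]

theorem pvLoop_map_lt (K : Int → Bool) (l : List PVRound) (i0 : Int)
    (p0 : List PVRound) (m0 : PySem.Dict Int Int) (j : Int) (hj : j < i0) :
    ((l.foldl (fun (s : Int × List PVRound × PySem.Dict Int Int) round_raw =>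
        if K s.1 then
          (s.1 + 1, s.2.1 ++ [round_raw], (s.2.2).insert s.1 (PySem.List.len s.2.1))
        else (s.1 + 1, s.2.1, s.2.2)) (i0, (p0, m0))).2.2).get? j
    = m0.get? j := by
  induction l generalizing i0 p0 m0 with
  | nil => simp
  | cons r l ih =>
    simp only [List.foldl_cons]
    by_cases h : K i0
    · rw [if_pos h, ih _ _ _ (by omega)]
      exact PySem.Dict.get?_insert_of_ne m0 _ (by omega)
    · rw [if_neg h]
      exact ih _ _ _ (by omega)

theorem pvLoop_map_at (K : Int → Bool) (l : List PVRound) (i0 : Int)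
    (p0 : List PVRound) (m0 : PySem.Dict Int Int) (k : Nat) (hk : k < l.length)
    (hmem : K (i0 + k) = true) :
    ((l.foldl (fun (s : Int × List PVRound × PySem.Dict Int Int) round_raw =>
        if K s.1 then
          (s.1 + 1, s.2.1 ++ [round_raw], (s.2.2).insert s.1 (PySem.List.len s.2.1))
        else (s.1 + 1, s.2.1, s.2.2)) (i0, (p0, m0))).2.2).get? (i0 + k)
    = some ((p0.length : Int) + ((pvKept K i0 (l.take k)).length : Int)) := by
  induction l generalizing i0 p0 m0 k with
  | nil => simp at hk
  | cons r l ih =>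
    cases k with
    | zero =>
      simp only [Nat.cast_zero, add_zero] at hmem ⊢
      simp only [List.foldl_cons]
      rw [if_pos hmem, pvLoop_map_lt K l (i0 + 1) _ _ i0 (by omega)]
      simp [PySem.Dict.get?_insert_self, pvKept]
    | succ k =>
      have hcast : i0 + ((k + 1 : Nat) : Int) = (i0 + 1) + (k : Nat) := by push_cast; ring
      have hmem' : K ((i0 + 1) + (k : Nat)) = true := by rw [← hcast]; exact hmem
      have hk' : k < l.length := by simpa using hk
      simp only [List.foldl_cons]
      by_cases h : K i0
      · rw [if_pos h, hcast, ih _ _ _ _ hk' hmem']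
        simp [pvKept, h]
        ring
      · rw [if_neg h, hcast, ih _ _ _ _ hk' hmem']
        simp [pvKept, h]

-- strictly sorted snoc list: everything before the last element is below it
theorem pv_snoc_lt (l : List Int) (m : Int) (hp : (l ++ [m]).Pairwise (· < ·)) :
    ∀ x ∈ l, x < m := by
  intro x hx
  exact (List.pairwise_append.mp hp).2.2 x hx m (by simp)

theorem pv_filter_lt_snoc (l : List Int) (m : Int) (hp : (l ++ [m]).Pairwise (· < ·)) :
    (l ++ [m]).filter (fun j => decide (j < m)) = l := by
  rw [List.filter_append]
  have h1 : l.filter (fun j => decide (j < m)) = l :=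
    List.filter_eq_self.mpr (fun a ha => by simpa using pv_snoc_lt l m hp a ha)
  simp [h1]

theorem pv_main (xs : List PVRound) (z : PVRound) :
    prune_flow_rounds_py (xs ++ [z]) = prune_flow_rounds_py_alt (xs ++ [z]) := by
  have hne : ((xs ++ [z] : List PVRound) = []) = False := by simp
  have hB : (List.foldl (fun acc round_raw => if pvAct round_raw then acc ++ [round_raw] else acc)
      ([] : List PVRound) (xs ++ [z])) = [] ++ ((xs ++ [z]).filter pvAct).map id :=
    PySem.List.foldl_append_if pvAct id (xs ++ [z]) []
  simp only [prune_flow_rounds_py, prune_flow_rounds_py_alt, hne, if_false]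
  rw [pvIdxs_foldl, pvIdxs_append, hB]
  simp only [List.nil_append, List.map_id, zero_add, pvIdxs, List.append_nil]
  simp only [PySem.List.pyGetD_neg_one_append_singleton]
  have hlen : PySem.List.len (xs ++ [z]) = (xs.length : Int) + 1 := by
    simp [PySem.List.len_eq]
  by_cases hz : pvAct z = true
  · -- final round substantive: no pending round is kept
    have hfz : List.filter pvAct [z] = [z] := by simp [hz]
    simp only [hz, if_true, List.filter_append, hfz, Bool.not_true, Bool.false_eq_true, if_false]
    have hSne : (pvIdxs 0 xs ++ [((xs.length : Nat) : Int)] = []) = False := by simp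
    have hBne : (List.filter pvAct xs ++ [z] = []) = False := by simp
    simp only [hSne, hBne, if_false]
    simp only [PySem.List.pyGetD_neg_one_append_singleton]
    have htail : PySem.List.pyRange (((xs.length : Nat) : Int) + 1) (PySem.List.len (xs ++ [z])) 1 = [] := by
      rw [hlen]; exact PySem.List.pyRange_one_eq_nil (by omega)
    simp only [htail, List.filter_nil, if_true]
    set K : Int → Bool := (PySem.Set.ofList (pvIdxs 0 xs ++ [((xs.length : Nat) : Int)])).contains with hKdef
    have hKn : K ((xs.length : Nat) : Int) = true := by
      rw [hKdef, PySem.Set.contains_iff, PySem.Set.mem_ofList]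
      simp
    have hK : ∀ k : Nat, k < xs.length → K (0 + (k : Int)) = pvAct (xs.getD k []) := by
      intro k hk
      rw [Bool.eq_iff_iff, hKdef, PySem.Set.contains_iff, PySem.Set.mem_ofList, List.mem_append]
      constructor
      · rintro (hmem | hmem)
        · rcases (pvIdxs_mem_iff xs 0 _).mp hmem with ⟨k', hk', hke, ha⟩
          have : k' = k := by simp at hke; omega
          rw [← this]; exact ha
        · simp at hmem; omega
      · intro ha
        exact Or.inl ((pvIdxs_mem_iff xs 0 _).mpr ⟨k, hk, by simp, ha⟩)
    rw [pvLoop_pruned K, pvKept_append, pvKept_eq_filter K xs 0 hK]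
    have hmap := pvLoop_map_at K (xs ++ [z]) 0 [] PySem.Dict.empty xs.length (by simp) (by simpa using hKn)
    rw [zero_add] at hmap
    rw [hmap, List.take_left, pvKept_eq_filter K xs 0 hK]
    have hkz : pvKept K (0 + ((xs.length : Nat) : Int)) [z] = [z] := by
      simp [pvKept, hKn]
    rw [hkz]
    simp [PySem.List.len_eq]
  · -- final round pending
    have hfz : List.filter pvAct [z] = [] := by simp [hz]
    simp only [hz, Bool.false_eq_true, if_false, List.filter_append, hfz, List.append_nil]
    by_cases hS0 : pvIdxs 0 xs = []
    · have hfx : List.filter pvAct xs = [] := (pvIdxs_nil_iff xs 0).mp hS0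
      simp [hS0, hfx]
    · -- some substantive round exists, and the final round is pending
      obtain ⟨S', m, hSeq⟩ := (List.eq_nil_or_concat (pvIdxs 0 xs)).resolve_left hS0
      rw [List.concat_eq_append] at hSeq
      have hm : m ∈ pvIdxs 0 xs := by rw [hSeq]; simp
      obtain ⟨km, hkm, hmeq, hact⟩ := (pvIdxs_mem_iff xs 0 m).mp hm
      rw [zero_add] at hmeq
      subst hmeq
      have hp := pvIdxs_pairwise xs 0
      rw [hSeq] at hp
      have hmax := pv_snoc_lt S' _ hp
      have hBne : (List.filter pvAct xs = []) = False := by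
        simp only [eq_iff_iff, iff_false]
        intro hnil
        exact hS0 ((pvIdxs_nil_iff xs 0).mpr hnil)
      simp only [hSeq, PySem.List.pyGetD_neg_one_append_singleton, hBne, if_false,
        Bool.not_false, if_true]
      have hSne : (S' ++ [((km : Nat) : Int)] = []) = False := by simp
      simp only [hSne, if_false]
      -- the tail_pending filter keeps every index after km
      have htail : List.filter (fun i => !pvAct (PySem.List.pyGetD (xs ++ [z]) i []))
          (PySem.List.pyRange (((km : Nat) : Int) + 1) (PySem.List.len (xs ++ [z])) 1)
          = PySem.List.pyRange (((km : Nat) : Int) + 1) (((xs.length : Nat) : Int) + 1) 1 := by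
        rw [hlen]
        apply List.filter_eq_self.mpr
        intro i hi
        rcases PySem.List.mem_pyRange_one.mp hi with ⟨hi1, hi2⟩
        have h0i : 0 ≤ i := by omega
        rcases lt_or_eq_of_le (by omega : i ≤ ((xs.length : Nat) : Int)) with hlt | heq
        · -- i < len xs: an index beyond the last substantive one is inactive
          have hi' : i = ((i.toNat : Nat) : Int) := by omega
          rw [hi', PySem.List.pyGetD_natCast]
          have hklen : i.toNat < xs.length := by omega
          rw [List.getD_append _ _ _ _ hklen]
          by_contra hcon
          simp only [Bool.not_eq_true', Bool.not_eq_false] at hcon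
          have : ((i.toNat : Nat) : Int) ∈ pvIdxs 0 xs :=
            (pvIdxs_mem_iff xs 0 _).mpr ⟨i.toNat, hklen, by simp, hcon⟩
          rw [hSeq] at this
          rcases List.mem_append.mp this with hmem | hmem
          · have := hmax _ hmem; omega
          · simp at hmem; omega
        · -- i = len xs: the final round itself, pending by assumption
          have hi' : i = ((xs.length : Nat) : Int) := heq
          rw [hi', PySem.List.pyGetD_natCast]
          have : (xs ++ [z]).getD xs.length [] = z := by
            simp [List.getD_eq_getElem?_getD]
          rw [this]
          simp [hz]
      rw [htail]
      have hrange : PySem.List.pyRange (((km : Nat) : Int) + 1) (((xs.length : Nat) : Int) + 1) 1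
          = PySem.List.pyRange (((km : Nat) : Int) + 1) ((xs.length : Nat) : Int) 1 ++ [((xs.length : Nat) : Int)] :=
        PySem.List.pyRange_one_succ_right (by omega)
      rw [hrange]
      have hrne : (PySem.List.pyRange (((km : Nat) : Int) + 1) ((xs.length : Nat) : Int) 1
          ++ [((xs.length : Nat) : Int)] = []) = False := by simp
      simp only [hrne, if_false, PySem.List.pyGetD_neg_one_append_singleton]
      set K : Int → Bool :=
        ((PySem.Set.ofList (S' ++ [((km : Nat) : Int)])).add ((xs.length : Nat) : Int)).contains with hKdef
      have hKn : K ((xs.length : Nat) : Int) = true := by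
        rw [hKdef, PySem.Set.contains_iff, PySem.Set.mem_add]
        exact Or.inr rfl
      have hKm : K ((km : Nat) : Int) = true := by
        rw [hKdef, PySem.Set.contains_iff, PySem.Set.mem_add, PySem.Set.mem_ofList]
        exact Or.inl (by simp)
      have hK : ∀ k : Nat, k < xs.length → K (0 + (k : Int)) = pvAct (xs.getD k []) := by
        intro k hk
        rw [Bool.eq_iff_iff, hKdef, PySem.Set.contains_iff, PySem.Set.mem_add, PySem.Set.mem_ofList, ← hSeq]
        constructor
        · rintro (hmem | hmem)
          · rcases (pvIdxs_mem_iff xs 0 _).mp hmem with ⟨k', hk', hke, ha⟩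
            have : k' = k := by simp at hke; omega
            rw [← this]; exact ha
          · simp at hmem; omega
        · intro ha
          exact Or.inl ((pvIdxs_mem_iff xs 0 _).mpr ⟨k, hk, by simp, ha⟩)
      rw [pvLoop_pruned K, pvKept_append, pvKept_eq_filter K xs 0 hK]
      have hkz : pvKept K (0 + ((xs.length : Nat) : Int)) [z] = [z] := by
        simp [pvKept, hKn]
      rw [hkz]
      have hmap := pvLoop_map_at K (xs ++ [z]) 0 [] PySem.Dict.empty km
        (by simp; omega) (by simpa using hKm)
      rw [zero_add] at hmap
      rw [hmap, List.take_append_of_le_length (by omega)]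
      -- count the kept rounds strictly before km
      have hkt : pvKept K 0 (xs.take km) = (xs.take km).filter pvAct := by
        apply pvKept_eq_filter
        intro k hk
        have hk' : k < km := by simp at hk; omega
        rw [List.getD_eq_getElem?_getD, List.getElem?_take, if_pos hk', ← List.getD_eq_getElem?_getD]
        exact hK k (by omega)
      have hcnt : ((xs.take km).filter pvAct).length = S'.length := by
        rw [← pvIdxs_length _ 0, pvIdxs_take, zero_add, hSeq, pv_filter_lt_snoc S' _ hp]
      rw [hkt, hcnt]
      have hlenS : (List.filter pvAct xs).length = S'.length + 1 := by
        rw [← pvIdxs_length _ 0, hSeq]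
        simp
      simp [PySem.List.len_eq, hlenS]
-- ===== VERDICT (by name: the statement is the Claim_ definition above) =====
theorem prune_flow_rounds_py_spec : Claim_equal_prune_flow_rounds_py := by
  intro rounds _
  unfold Spec_prune_flow_rounds_py
  rcases List.eq_nil_or_concat rounds with rfl | ⟨xs, z, rfl⟩
  · rfl
  · rw [List.concat_eq_append]
    exact pv_main xs z
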